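-- pv_equiv track=rewrite | github.com/burning-calamity/extirpation | online/fibonacci_caesar.py | fibonacci_caesar_decrypt
-- ===== SOURCE A (Python) =====
-- def _fib(n: int) -> list[int]:
--     seq = [1, 1]
--     while len(seq) < n:
--         seq.append((seq[-1] + seq[-2]) % 26)
--     return seq[:n]
--
-- def fibonacci_caesar_decrypt(ciphertext: str) -> str:
--     """Decrypt text produced by ``fibonacci_caesar_encrypt``."""
--     letters = sum(1 for c in ciphertext if c.isalpha())
--     fib = _fib(letters)
--     out: list[str] = []
--     i = 0
--     for ch in ciphertext:
--         if ch.isalpha():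
--             s = fib[i] % 26
--             base = ord('A') if ch.isupper() else ord('a')
--             c = ord(ch.upper()) - ord('A')
--             out.append(chr(base + ((c - s) % 26)))
--             i += 1
--         else:
--             out.append(ch)
--     return ''.join(out)
-- ===== SOURCE B (Python) =====
-- def fibonacci_caesar_decrypt(ciphertext: str) -> str:
--     """Decrypt text produced by ``fibonacci_caesar_encrypt``."""
--     out = []
--     cur, nxt = 1, 1
--     for ch in ciphertext:
--         if ch.isalpha():
--             base = ord('A') if ch.isupper() else ord('a')
--             out.append(chr(base + (ord(ch) - base - cur) % 26))
--             cur, nxt = nxt, (cur + nxt) % 26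
--         else:
--             out.append(ch)
--     return ''.join(out)
-- ===== Notes on version B (the rewrite author's own statement) =====
-- stated objective: simpler
-- what changed: B drops A's pre-pass that counts the letters and A's precomputed Fibonacci-shift table (_fib) entirely, doing a single pass that carries the two rolling Fibonacci values (cur, nxt) mod 26 as it decodes.
import Mathlib
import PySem

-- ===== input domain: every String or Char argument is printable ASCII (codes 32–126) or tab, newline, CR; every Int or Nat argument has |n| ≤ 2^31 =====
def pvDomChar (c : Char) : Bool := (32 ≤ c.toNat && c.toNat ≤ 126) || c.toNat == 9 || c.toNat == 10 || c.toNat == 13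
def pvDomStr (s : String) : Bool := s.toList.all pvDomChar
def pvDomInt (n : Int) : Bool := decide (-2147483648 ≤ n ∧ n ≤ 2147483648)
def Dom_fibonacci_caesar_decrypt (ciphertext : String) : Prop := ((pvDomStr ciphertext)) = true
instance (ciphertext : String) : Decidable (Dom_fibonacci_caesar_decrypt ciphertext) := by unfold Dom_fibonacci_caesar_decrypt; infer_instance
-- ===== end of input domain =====

-- B replaces A's two-pass scheme (count the letters, precompute the whole Fibonacci-shift
-- table, then index it) by a single pass carrying two rolling integers (objective: simpler).

-- ===== PORT A =====
-- while len(seq) < n: seq.append((seq[-1] + seq[-2]) % 26)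
def pvFibLoop (seq : List Int) (n : Nat) : List Int :=
  if _h : seq.length < n then
    pvFibLoop (seq ++ [PySem.Int.mod (PySem.List.pyGetD seq (-1) 0 + PySem.List.pyGetD seq (-2) 0) 26]) n
  else seq
termination_by n - seq.length
decreasing_by simp; omega

def pvFibA (n : Nat) : List Int := (pvFibLoop [1, 1] n).take n

-- the main 'for ch in ciphertext' loop of A: state = (accumulated out, letter index i)
def pvALoop (fib : List Int) : List Char → List Char → Nat → List Char
  | [], out, _ => out
  | ch :: rest, out, i =>
    if PySem.Chars.isalpha ch then
      let s : Int := PySem.Int.mod (PySem.List.pyGetD fib (i : Int) 0) 26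
      let base : Int := if PySem.Chars.isupper ch then 65 else 97
      let c : Int := ((PySem.Chars.upperChar ch).toNat : Int) - 65
      pvALoop fib rest (out ++ [Char.ofNat (base + PySem.Int.mod (c - s) 26).toNat]) (i + 1)
    else
      pvALoop fib rest (out ++ [ch]) i

def fibonacci_caesar_decrypt (ciphertext : String) : String :=
  let letters : Nat := ciphertext.toList.countP (fun c => PySem.Chars.isalpha c)
  let fib := pvFibA letters
  String.ofList (pvALoop fib ciphertext.toList [] 0)

-- ===== PORT B =====
-- one pass; state = (accumulated out, cur, nxt), cur is the current shift
def pvBLoop : List Char → List Char → Int → Int → List Char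
  | [], out, _, _ => out
  | ch :: rest, out, cur, nxt =>
    if PySem.Chars.isalpha ch then
      let base : Int := if PySem.Chars.isupper ch then 65 else 97
      pvBLoop rest (out ++ [Char.ofNat (base + PySem.Int.mod ((ch.toNat : Int) - base - cur) 26).toNat])
        nxt (PySem.Int.mod (cur + nxt) 26)
    else
      pvBLoop rest (out ++ [ch]) cur nxt

def fibonacci_caesar_decrypt_alt (ciphertext : String) : String :=
  String.ofList (pvBLoop ciphertext.toList [] 1 1)

-- ===== PRECONDITION & SPEC =====
def Spec_fibonacci_caesar_decrypt (ciphertext : String) (out : String) : Prop := out = fibonacci_caesar_decrypt_alt ciphertext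
instance (ciphertext : String) (out : String) : Decidable (Spec_fibonacci_caesar_decrypt ciphertext out) := by unfold Spec_fibonacci_caesar_decrypt; infer_instance

-- ===== CLAIM (what is proved, stated in full; the proofs are below) =====
def Claim_equal_fibonacci_caesar_decrypt : Prop := ∀ (ciphertext : String), Dom_fibonacci_caesar_decrypt ciphertext → Spec_fibonacci_caesar_decrypt ciphertext (fibonacci_caesar_decrypt ciphertext)

-- ===== LEMMAS AND PROOFS =====

-- the mathematical shift sequence both programs realise
def pvF : Nat → Int
  | 0 => 1
  | 1 => 1
  | n + 2 => PySem.Int.mod (pvF n + pvF (n + 1)) 26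

lemma pvF_bounds (i : Nat) : 0 ≤ pvF i ∧ pvF i < 26 := by
  match i with
  | 0 => exact ⟨by decide, by decide⟩
  | 1 => exact ⟨by decide, by decide⟩
  | n + 2 =>
    exact ⟨PySem.Int.mod_nonneg _ (by omega), PySem.Int.mod_lt _ (by omega)⟩

lemma pvF_mod (i : Nat) : PySem.Int.mod (pvF i) 26 = pvF i := by
  have h := pvF_bounds i
  rw [PySem.Int.mod_eq_emod_of_pos (by omega)]
  exact Int.emod_eq_of_lt h.1 h.2

lemma pvFibLoop_eq (k : Nat) : ∀ (n m : Nat), n - m ≤ k → 2 ≤ m →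
    pvFibLoop ((List.range m).map pvF) n = (List.range (max m n)).map pvF := by
  induction k with
  | zero =>
    intro n m hk hm
    have hlen : ((List.range m).map pvF).length = m := by simp
    have hcond : ¬ ((List.range m).map pvF).length < n := by omega
    rw [pvFibLoop, dif_neg hcond, show max m n = m by omega]
  | succ k ih =>
    intro n m hk hm
    by_cases h : m < n
    · have hlen : ((List.range m).map pvF).length = m := by simp
      have hcond : ((List.range m).map pvF).length < n := by omega
      rw [pvFibLoop, dif_pos hcond]
      have h1 : PySem.List.pyGetD ((List.range m).map pvF) (-1) 0 = pvF (m - 1) := by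
        rw [PySem.List.pyGetD_neg_ofNat _ 1 _ (by omega) (by omega)]
        simp only [hlen]
        rw [List.getElem_map, List.getElem_range]
      have h2 : PySem.List.pyGetD ((List.range m).map pvF) (-2) 0 = pvF (m - 2) := by
        rw [PySem.List.pyGetD_neg_ofNat _ 2 _ (by omega) (by omega)]
        simp only [hlen]
        rw [List.getElem_map, List.getElem_range]
      rw [h1, h2]
      have hval : PySem.Int.mod (pvF (m - 1) + pvF (m - 2)) 26 = pvF m := by
        conv_rhs => rw [show m = (m - 2) + 2 by omega, pvF]
        rw [show m - 2 + 1 = m - 1 by omega]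
        rw [Int.add_comm (pvF (m - 2))]
      rw [hval]
      have hstep : (List.range m).map pvF ++ [pvF m] = (List.range (m + 1)).map pvF := by
        rw [List.range_succ, List.map_append, List.map_singleton]
      rw [hstep, ih n (m + 1) (by omega) (by omega),
        show max (m + 1) n = max m n by omega]
    · have hlen : ((List.range m).map pvF).length = m := by simp
      have hcond : ¬ ((List.range m).map pvF).length < n := by omega
      rw [pvFibLoop, dif_neg hcond, show max m n = m by omega]

lemma pvFibA_getD (n i : Nat) (hi : i < n) : ((pvFibA n).getD i 0) = pvF i := by
  have h0 : ([1, 1] : List Int) = (List.range 2).map pvF := by decide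
  unfold pvFibA
  rw [h0, pvFibLoop_eq (n - 2) n 2 (by omega) (by omega)]
  rw [← List.map_take, List.take_range]
  have hmin : min n (max 2 n) = n := by omega
  rw [hmin]
  rw [List.getD_eq_getElem _ _ (by simpa using hi)]
  rw [List.getElem_map, List.getElem_range]

-- for an (ASCII) alphabetic char, ord(ch.upper()) - ord('A') = ord(ch) - base
lemma pvChar_code (ch : Char) (h : PySem.Chars.isalpha ch = true) :
    ((PySem.Chars.upperChar ch).toNat : Int) - 65
      = (ch.toNat : Int) - (if PySem.Chars.isupper ch then (65 : Int) else 97) := by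
  simp only [PySem.Chars.isalpha, Bool.or_eq_true] at h
  rcases h with h | h
  · have hu : 65 ≤ ch.toNat ∧ ch.toNat ≤ 90 := by
      simpa [PySem.Chars.isupper, Char.le_def] using h
    have hlink : ch.toNat = ch.val.toNat := rfl
    have hlo : PySem.Chars.islower ch = false := by
      simp [PySem.Chars.islower, Char.le_def, UInt32.le_iff_toNat_le]
      intro hx
      omega
    simp [PySem.Chars.upperChar, hlo, h]
  · have hl : 97 ≤ ch.toNat ∧ ch.toNat ≤ 122 := by
      simpa [PySem.Chars.islower, Char.le_def] using h
    have hlink : ch.toNat = ch.val.toNat := rfl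
    have hup : PySem.Chars.isupper ch = false := by
      simp [PySem.Chars.isupper, Char.le_def, UInt32.le_iff_toNat_le]
      intro hx
      omega
    have hofnat : (Char.ofNat (ch.toNat - 32)).toNat = ch.toNat - 32 := by
      rw [Char.toNat_ofNat, if_pos (by simp [Nat.isValidChar]; omega)]
    simp only [PySem.Chars.upperChar, h, if_true, hup, Bool.false_eq_true, if_false, hofnat]
    omega

-- the two loops agree whenever the fib table covers all remaining letters
lemma pvLoop_eq (cs : List Char) : ∀ (out : List Char) (i n : Nat),
    i + cs.countP (fun c => PySem.Chars.isalpha c) ≤ n →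
    pvALoop (pvFibA n) cs out i = pvBLoop cs out (pvF i) (pvF (i + 1)) := by
  induction cs with
  | nil => intro out i n _; rfl
  | cons ch rest ih =>
    intro out i n hn
    rw [List.countP_cons] at hn
    by_cases h : PySem.Chars.isalpha ch
    · simp [h] at hn
      rw [pvALoop, pvBLoop, if_pos h, if_pos h]
      have hs : PySem.Int.mod (PySem.List.pyGetD (pvFibA n) (i : Int) 0) 26 = pvF i := by
        rw [PySem.List.pyGetD_natCast, pvFibA_getD n i (by omega), pvF_mod]
      have hc : ((PySem.Chars.upperChar ch).toNat : Int) - 65 - pvF i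
          = (ch.toNat : Int) - (if PySem.Chars.isupper ch then (65 : Int) else 97) - pvF i := by
        rw [pvChar_code ch h]
      simp only [hs, hc]
      rw [ih _ (i + 1) n (by omega)]
      rfl
    · simp [h] at hn
      rw [pvALoop, pvBLoop, if_neg h, if_neg h]
      exact ih _ i n (by omega)

-- ===== VERDICT (by name: the statement is the Claim_ definition above) =====
theorem fibonacci_caesar_decrypt_spec : Claim_equal_fibonacci_caesar_decrypt := by
  intro ciphertext _
  unfold Spec_fibonacci_caesar_decrypt fibonacci_caesar_decrypt fibonacci_caesar_decrypt_alt
  show String.ofList (pvALoop (pvFibA (ciphertext.toList.countP (fun c => PySem.Chars.isalpha c)))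
      ciphertext.toList [] 0) = String.ofList (pvBLoop ciphertext.toList [] 1 1)
  rw [pvLoop_eq ciphertext.toList [] 0
      (ciphertext.toList.countP (fun c => PySem.Chars.isalpha c)) (by omega)]
  rfl
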